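-- pv_equiv track=rewrite | github.com/pbrehaut/f5_config_parser | f5_config_parser/reports/device_report.py | _parse_modules_string
-- ===== SOURCE A (Python) =====
-- def _parse_modules_string(modules_str: str) -> list[str]:
--     """Parse modules string into individual module names."""
--     if not modules_str:
--         return []
--
--     # Remove outer braces and split by quoted strings
--     modules_str = modules_str.strip('{}').strip()
--
--     modules = []
--     current_module = []
--     in_quotes = False
--
--     for char in modules_str:
--         if char == '"':
--             in_quotes = not in_quotes
--             if not in_quotes and current_module:
--                 # End of a module
--                 modules.append(''.join(current_module).strip())
--                 current_module = []
--         elif in_quotes: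
--             current_module.append(char)
--
--     # Handle any remaining module
--     if current_module:
--         modules.append(''.join(current_module).strip())
--
--     return [m for m in modules if m]
-- ===== SOURCE B (Python) =====
-- def _parse_modules_string(modules_str: str) -> list[str]:
--     """Parse modules string into individual module names."""
--     parts = modules_str.strip('{}').strip().split('"')
--     return [m for m in (p.strip() for p in parts[1::2]) if m]
-- ===== Notes on version B (the rewrite author's own statement) =====
-- stated objective: idiomatic
-- what changed: Replaces the explicit in_quotes state-machine loop with the idiomatic pipeline: split the brace/whitespace-stripped string on the double-quote character, take the odd-index pieces (the quoted spans, including a trailing unterminated one), strip each and drop empties.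
import Mathlib
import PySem

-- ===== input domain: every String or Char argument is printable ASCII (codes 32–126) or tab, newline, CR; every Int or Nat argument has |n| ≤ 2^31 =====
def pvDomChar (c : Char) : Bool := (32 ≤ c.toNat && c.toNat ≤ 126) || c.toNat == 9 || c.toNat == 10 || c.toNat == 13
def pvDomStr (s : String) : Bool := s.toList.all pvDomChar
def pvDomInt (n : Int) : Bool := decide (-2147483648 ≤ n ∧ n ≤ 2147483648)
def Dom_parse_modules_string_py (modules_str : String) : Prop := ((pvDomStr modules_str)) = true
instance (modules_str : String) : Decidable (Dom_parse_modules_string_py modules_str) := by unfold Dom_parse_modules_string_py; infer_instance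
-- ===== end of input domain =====

-- B replaces A's in_quotes state-machine loop by the idiomatic split-on-'"' pipeline
-- (the quoted spans are the odd-index pieces), objective: idiomatic (measured faster at large sizes); same return value.

-- ===== PORT A =====
-- the loop body of `for char in modules_str`
def pvStepA (st : List String × List Char × Bool) (c : Char) : List String × List Char × Bool :=
  let (modules, current, inq) := st
  if c = '"' then
    let inq' := !inq
    if inq' = false ∧ current ≠ [] then
      (modules ++ [PySem.Str.strip (String.ofList current)], [], inq')
    else (modules, current, inq')
  else if inq then (modules, current ++ [c], inq)
  else (modules, current, inq)

def parse_modules_string_py (modules_str : String) : List String :=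
  if modules_str = "" then []
  else
    let s := PySem.Str.strip (PySem.Str.stripChars modules_str "{}")
    let st := s.toList.foldl pvStepA ([], [], false)
    let modules := if st.2.1 ≠ [] then st.1 ++ [PySem.Str.strip (String.ofList st.2.1)] else st.1
    modules.filter (fun m => m ≠ "")

-- ===== PORT B =====
def parse_modules_string_py_alt (modules_str : String) : List String :=
  let parts := (PySem.Str.split? (PySem.Str.strip (PySem.Str.stripChars modules_str "{}")) "\"").getD []
  let odd := (PySem.List.slice? parts (some 1) none 2).getD []
  (odd.map (fun p => PySem.Str.strip p)).filter (fun m => m ≠ "")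

-- ===== PRECONDITION & SPEC =====
def Spec_parse_modules_string_py (modules_str : String) (out : List String) : Prop := out = parse_modules_string_py_alt modules_str
instance (modules_str : String) (out : List String) : Decidable (Spec_parse_modules_string_py modules_str out) := by unfold Spec_parse_modules_string_py; infer_instance

-- ===== CLAIM (what is proved, stated in full; the proofs are below) =====
def Claim_equal_parse_modules_string_py : Prop := ∀ (modules_str : String), Dom_parse_modules_string_py modules_str → Spec_parse_modules_string_py modules_str (parse_modules_string_py modules_str)

-- ===== LEMMAS AND PROOFS =====

-- split on '"' as a structural recursion
def pvSplitQ : List Char → List (List Char)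
  | [] => [[]]
  | c :: cs => if c = '"' then [] :: pvSplitQ cs else (pvSplitQ cs).modifyHead (c :: ·)

-- alternate elements: pvAlt true = even indices, pvAlt false = odd indices
def pvAlt {α : Type} (b : Bool) : List α → List α
  | [] => []
  | a :: t => if b then a :: pvAlt false t else pvAlt true t

theorem pvModifyHead_id {α : Type} (l : List α) : l.modifyHead (fun x => x) = l := by
  cases l <;> simp

theorem pvModifyHead_congr {α : Type} (f g : α → α) (l : List α) (h : ∀ x, f x = g x) :
    l.modifyHead f = l.modifyHead g := by
  cases l <;> simp [h]

theorem pvSplitOn_go_spec : ∀ (fuel : Nat) (l cur : List Char) (acc : List (List Char)),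
    l.length < fuel →
    PySem.Chars.splitOn.go ['"'] fuel l cur acc
      = acc.reverse ++ (pvSplitQ l).modifyHead (cur.reverse ++ ·) := by
  intro fuel
  induction fuel with
  | zero => intro l cur acc h; omega
  | succ f ih =>
    intro l cur acc h
    cases l with
    | nil => simp [PySem.Chars.splitOn.go, pvSplitQ]
    | cons c rest =>
      by_cases hc : c = '"'
      · subst hc
        have hpre : (['"'].isPrefixOf ('"' :: rest)) = true := by simp [List.isPrefixOf]
        rw [show PySem.Chars.splitOn.go ['"'] (f+1) ('"' :: rest) cur acc
              = PySem.Chars.splitOn.go ['"'] f (List.drop 1 ('"' :: rest)) [] (cur.reverse :: acc) by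
            simp [PySem.Chars.splitOn.go, hpre]]
        rw [ih _ _ _ (by simpa using Nat.lt_of_succ_lt_succ h)]
        simp [pvSplitQ, pvModifyHead_id]
      · have hpre : (['"'].isPrefixOf (c :: rest)) = false := by
          simp [List.isPrefixOf]; exact fun h' => hc h'.symm
        rw [show PySem.Chars.splitOn.go ['"'] (f+1) (c :: rest) cur acc
              = PySem.Chars.splitOn.go ['"'] f rest (c :: cur) acc by
            simp [PySem.Chars.splitOn.go, hpre]]
        rw [ih _ _ _ (by simpa using Nat.lt_of_succ_lt_succ h)]
        have hq : pvSplitQ (c :: rest) = (pvSplitQ rest).modifyHead (c :: ·) := by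
          simp [pvSplitQ, hc]
        rw [hq, List.modifyHead_modifyHead]
        congr 1
        exact pvModifyHead_congr _ _ _ (fun x => by simp)

theorem pvSplitOn_eq (l : List Char) : PySem.Chars.splitOn l ['"'] = pvSplitQ l := by
  unfold PySem.Chars.splitOn
  rw [pvSplitOn_go_spec _ _ _ _ (by omega)]
  simp [pvModifyHead_id]

theorem pvAlt_spec {α : Type} : ∀ (xs : List α),
    (List.range (xs.length / 2)).filterMap (fun k => xs[1 + 2 * k]?) = pvAlt false xs
  ∧ (List.range ((xs.length + 1) / 2)).filterMap (fun k => xs[2 * k]?) = pvAlt true xs := by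
  intro xs
  induction xs with
  | nil => simp [pvAlt]
  | cons a t ih =>
    constructor
    · rw [show (a :: t).length / 2 = (t.length + 1) / 2 by simp only [List.length_cons]]
      have hcg : List.filterMap (fun k => (a :: t)[1 + 2 * k]?) (List.range ((t.length + 1) / 2))
          = List.filterMap (fun k => t[2 * k]?) (List.range ((t.length + 1) / 2)) := by
        apply List.filterMap_congr
        intro k _
        have h3 : 1 + 2 * k = 2 * k + 1 := by omega
        rw [h3]
        simp
      rw [hcg, ih.2]
      simp [pvAlt]
    · rw [show ((a :: t).length + 1) / 2 = t.length / 2 + 1 by simp only [List.length_cons]; omega,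
          List.range_succ_eq_map, List.filterMap_cons, List.filterMap_map]
      have hz : (a :: t)[2 * 0]? = some a := by simp
      rw [hz]
      have hF : ((fun k => (a :: t)[2 * k]?) ∘ Nat.succ) = (fun k => t[1 + 2 * k]?) := by
        funext k
        have h3 : 2 * Nat.succ k = (1 + 2 * k) + 1 := by omega
        simp [Function.comp, h3]
      rw [hF, ih.1]
      simp [pvAlt]

theorem pvSlice?_odd {α : Type} (xs : List α) :
    PySem.List.slice? xs (some 1) none 2 = some (pvAlt false xs) := by
  cases xs with
  | nil => simp [PySem.List.slice?, PySem.List.sliceIndices, pvAlt]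
  | cons a t =>
    unfold PySem.List.slice? PySem.List.sliceIndices
    norm_num
    have hcnt : (if 0 < t.length then (((t.length : Int) + 2 - 1) / 2).toNat else 0)
        = (t.length + 1) / 2 := by
      split_ifs with h <;> omega
    rw [hcnt]
    have hcg : List.filterMap (fun k => (a :: t)[((1 : Int) + 2 * (k : Nat)).toNat]?)
          (List.range ((t.length + 1) / 2))
        = List.filterMap (fun k => t[2 * k]?) (List.range ((t.length + 1) / 2)) := by
      apply List.filterMap_congr
      intro k _
      have h3 : ((1 : Int) + 2 * (k : Nat)).toNat = 2 * k + 1 := by omega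
      rw [h3]
      simp
    rw [hcg, (pvAlt_spec t).2]
    simp [pvAlt]

-- strip of the joined chars
def pvStripS (l : List Char) : String := PySem.Str.strip (String.ofList l)

def pvSegStrs (l : List (List Char)) : List String :=
  (l.filter (fun s => s ≠ [])).map pvStripS

def pvFinish (st : List String × List Char × Bool) : List String :=
  if st.2.1 ≠ [] then st.1 ++ [pvStripS st.2.1] else st.1

theorem pvAlt_modifyHead_true {α : Type} (f : List α → List α) :
    ∀ (l : List (List α)), pvAlt true (l.modifyHead f) = (pvAlt true l).modifyHead f := by
  intro l; cases l <;> simp [pvAlt]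

theorem pvAlt_modifyHead_false {α : Type} (f : List α → List α) :
    ∀ (l : List (List α)), pvAlt false (l.modifyHead f) = pvAlt false l := by
  intro l; cases l <;> simp [pvAlt]

theorem pvMachine : ∀ (cs : List Char) (m : List String) (cur : List Char) (inq : Bool),
    (inq = false → cur = []) →
    pvFinish (cs.foldl pvStepA (m, cur, inq))
      = m ++ pvSegStrs (if inq then ((pvAlt true (pvSplitQ cs)).modifyHead (cur ++ ·))
                        else pvAlt false (pvSplitQ cs)) := by
  intro cs
  induction cs with
  | nil =>
    intro m cur inq hinv
    cases inq with
    | false => simp [hinv rfl, pvFinish, pvSplitQ, pvAlt, pvSegStrs]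
    | true =>
      by_cases hc : cur = []
      · simp [hc, pvFinish, pvSplitQ, pvAlt, pvSegStrs]
      · simp [pvFinish, hc, pvSplitQ, pvAlt, pvSegStrs, pvStripS]
  | cons c rest ih =>
    intro m cur inq hinv
    by_cases hc : c = '"'
    · subst hc
      cases inq with
      | false =>
        have hcur := hinv rfl
        subst hcur
        have hstep : pvStepA (m, ([] : List Char), false) '"' = (m, [], true) := by
          simp [pvStepA]
        rw [List.foldl_cons, hstep, ih m [] true (by simp)]
        simp [pvSplitQ, pvAlt, pvModifyHead_id]
      | true =>
        by_cases hcur : cur = []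
        · subst hcur
          have hstep : pvStepA (m, ([] : List Char), true) '"' = (m, [], false) := by
            simp [pvStepA]
          rw [List.foldl_cons, hstep, ih m [] false (fun _ => rfl)]
          simp [pvSplitQ, pvAlt, pvSegStrs]
        · have hstep : pvStepA (m, cur, true) '"'
              = (m ++ [pvStripS cur], [], false) := by
            simp [pvStepA, hcur, pvStripS]
          rw [List.foldl_cons, hstep, ih (m ++ [pvStripS cur]) [] false (fun _ => rfl)]
          simp [pvSplitQ, pvAlt, pvSegStrs, hcur]
    · cases inq with
      | false =>
        have hcur := hinv rfl
        subst hcur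
        have hstep : pvStepA (m, ([] : List Char), false) c = (m, [], false) := by
          simp [pvStepA, hc]
        rw [List.foldl_cons, hstep, ih m [] false (fun _ => rfl)]
        simp [pvSplitQ, hc, pvAlt_modifyHead_false]
      | true =>
        have hstep : pvStepA (m, cur, true) c = (m, cur ++ [c], true) := by
          simp [pvStepA, hc]
        rw [List.foldl_cons, hstep, ih m (cur ++ [c]) true (by simp)]
        have hq : pvSplitQ (c :: rest) = (pvSplitQ rest).modifyHead (c :: ·) := by
          simp [pvSplitQ, hc]
        simp only [hq, if_true, pvAlt_modifyHead_true, List.modifyHead_modifyHead]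
        exact congrArg (fun l => m ++ pvSegStrs l)
          (pvModifyHead_congr _ _ _ (fun x => by simp [Function.comp]))

theorem pvStripS_nil : pvStripS [] = "" := by decide

theorem pvSegStrs_filter (l : List (List Char)) :
    (pvSegStrs l).filter (fun m => m ≠ "") = (l.map pvStripS).filter (fun m => m ≠ "") := by
  induction l with
  | nil => simp [pvSegStrs]
  | cons a t ih =>
    simp only [pvSegStrs, ne_eq, decide_not] at ih ⊢
    by_cases ha : a = []
    · subst ha
      simp [pvStripS_nil, ih]
    · by_cases hs : pvStripS a = "" <;> simp [ha, hs, ih]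

theorem pvAlt_map {α β : Type} (f : α → β) :
    ∀ (l : List α) (b : Bool), pvAlt b (l.map f) = (pvAlt b l).map f := by
  intro l
  induction l with
  | nil => intro b; simp [pvAlt]
  | cons a t ih => intro b; cases b <;> simp [pvAlt, ih]

theorem pvMain (modules_str : String) :
    parse_modules_string_py modules_str = parse_modules_string_py_alt modules_str := by
  by_cases h0 : modules_str = ""
  · subst h0; decide
  · unfold parse_modules_string_py parse_modules_string_py_alt
    rw [if_neg h0]
    set s := PySem.Str.strip (PySem.Str.stripChars modules_str "{}") with hs
    -- B side: evaluate split? and slice?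
    have hsplit : PySem.Str.split? s "\"" = some ((pvSplitQ s.toList).map String.ofList) := by
      unfold PySem.Str.split? PySem.Chars.split?
      rw [if_neg (by simp)]
      simp [pvSplitOn_eq]
    rw [hsplit]
    simp only [Option.getD_some]
    rw [show ((pvSplitQ s.toList).map String.ofList : List String) = List.map String.ofList (pvSplitQ s.toList) from rfl]
    rw [pvSlice?_odd]
    simp only [Option.getD_some]
    rw [pvAlt_map]
    -- A side: the machine lemma
    have hm := pvMachine s.toList [] [] false (fun _ => rfl)
    simp only [if_false, Bool.false_eq_true, List.nil_append] at hm
    have hfin : (if (s.toList.foldl pvStepA ([], [], false)).2.1 ≠ [] then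
          (s.toList.foldl pvStepA ([], [], false)).1 ++
            [PySem.Str.strip (String.ofList (s.toList.foldl pvStepA ([], [], false)).2.1)]
        else (s.toList.foldl pvStepA ([], [], false)).1)
        = pvFinish (s.toList.foldl pvStepA ([], [], false)) := by
      simp [pvFinish, pvStripS]
    rw [hfin, hm, pvSegStrs_filter,
        show pvStripS = ((fun p => PySem.Str.strip p) ∘ String.ofList) from rfl,
        List.map_map]

-- ===== VERDICT (by name: the statement is the Claim_ definition above) =====
theorem parse_modules_string_py_spec : Claim_equal_parse_modules_string_py := by
  intro modules_str _
  unfold Spec_parse_modules_string_py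
  exact pvMain modules_str
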